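-- pv_equiv track=rewrite | github.com/NLP4ALL/nlp4all | nlp4all/helpers/data_source.py | schema_path_index_and_keys_for_pgsql
-- ===== SOURCE A (Python) =====
-- import typing as t
--
-- def schema_path_index_and_keys_for_pgsql(path: t.Tuple[str, ...]) -> t.List[t.Tuple[int, str]]:
--     """Gets the index and key for each part in a schema path.
--     This is used in the query because we can't use arrays in the query
--
--     Args:
--         path: The schema path to get the index and keys for.
--
--     Returns:
--         A list of tuples of the index and key for each part.
--     """
--
--     index_and_keys = []
--     current_index = 0  # pg is 1 indexed, but the first item is "properties" / root
--     for part in path: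
--         if part == "items":
--             current_index += 1
--         elif part != "properties":
--             current_index += 1
--             index_and_keys.append((current_index, part))
--     return index_and_keys
-- ===== SOURCE B (Python) =====
-- import typing as t
--
-- def schema_path_index_and_keys_for_pgsql(path: t.Tuple[str, ...]) -> t.List[t.Tuple[int, str]]:
--     # Closed-form index: the pg index of the part at position i is its 1-based
--     # position minus the number of "properties" parts in the prefix path[:i+1].
--     return [(i + 1 - path[:i + 1].count("properties"), p)
--             for i, p in enumerate(path)
--             if p != "properties" and p != "items"]
-- ===== Notes on version B (the rewrite author's own statement) =====
-- stated objective: alternative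
-- what changed: Replaces A's stateful running counter with a stateless closed form: each kept part's index is computed independently as its 1-based position minus the count of 'properties' in the prefix path[:i+1].
import Mathlib
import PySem

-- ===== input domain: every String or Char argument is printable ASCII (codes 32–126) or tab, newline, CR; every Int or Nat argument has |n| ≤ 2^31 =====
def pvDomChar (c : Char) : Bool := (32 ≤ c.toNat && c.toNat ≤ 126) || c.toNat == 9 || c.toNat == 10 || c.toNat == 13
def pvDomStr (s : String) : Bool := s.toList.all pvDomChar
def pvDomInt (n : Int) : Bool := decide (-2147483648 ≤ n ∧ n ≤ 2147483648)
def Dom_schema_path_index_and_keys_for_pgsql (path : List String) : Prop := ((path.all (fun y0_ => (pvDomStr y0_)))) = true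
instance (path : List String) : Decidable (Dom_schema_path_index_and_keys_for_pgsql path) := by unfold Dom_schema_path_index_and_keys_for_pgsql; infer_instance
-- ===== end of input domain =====

-- B drops A's running counter: each kept part's index is computed by the closed form
-- "1-based position minus number of 'properties' in the prefix" (alternative decomposition, not faster).

-- ===== PORT A =====
-- A's for-loop over state (current_index, index_and_keys), one step per path part, branches in A's order.
def pvLoopA (current_index : Int) (index_and_keys : List (Int × String)) : List String → List (Int × String)
  | [] => index_and_keys
  | part :: rest =>
    if part == "items" then pvLoopA (current_index + 1) index_and_keys rest
    else if part != "properties" then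
      pvLoopA (current_index + 1) (index_and_keys ++ [(current_index + 1, part)]) rest
    else pvLoopA current_index index_and_keys rest

def schema_path_index_and_keys_for_pgsql (path : List String) : List (Int × String) :=
  pvLoopA 0 [] path

-- ===== PORT B =====
-- B's single comprehension: keep (i, p) with p ∉ {"properties","items"}, index = i+1 - path[:i+1].count("properties").
def schema_path_index_and_keys_for_pgsql_alt (path : List String) : List (Int × String) :=
  ((PySem.List.enumerate path 0).filter
      (fun ip => ip.2 != "properties" && ip.2 != "items")).map
    (fun ip => (ip.1 + 1 - ((PySem.List.slice path none (some (ip.1 + 1))).count "properties" : Int), ip.2))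

-- ===== PRECONDITION & SPEC =====
def Spec_schema_path_index_and_keys_for_pgsql (path : List String) (out : List (Int × String)) : Prop := out = schema_path_index_and_keys_for_pgsql_alt path
instance (path : List String) (out : List (Int × String)) : Decidable (Spec_schema_path_index_and_keys_for_pgsql path out) := by unfold Spec_schema_path_index_and_keys_for_pgsql; infer_instance

-- ===== CLAIM (what is proved, stated in full; the proofs are below) =====
def Claim_equal_schema_path_index_and_keys_for_pgsql : Prop := ∀ (path : List String), Dom_schema_path_index_and_keys_for_pgsql path → Spec_schema_path_index_and_keys_for_pgsql path (schema_path_index_and_keys_for_pgsql path)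

-- ===== LEMMAS AND PROOFS =====


-- Invariant: running A's loop over the suffix `path` after having consumed `pre`
-- (so current_index = |pre| - #properties(pre)) produces exactly B's closed-form pairs
-- for that suffix, indexed against the full list `pre ++ path`.
theorem pv_loop_closed (path : List String) : ∀ (pre : List String) (acc : List (Int × String)),
    pvLoopA ((pre.length : Int) - (pre.count "properties" : Int)) acc path
      = acc ++ ((PySem.List.enumerate path (pre.length : Int)).filter
          (fun ip => ip.2 != "properties" && ip.2 != "items")).map
          (fun ip => (ip.1 + 1 - (((pre ++ path).take (ip.1 + 1).toNat).count "properties" : Int), ip.2)) := by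
  induction path with
  | nil => intro pre acc; simp [pvLoopA, PySem.List.enumerate_nil]
  | cons p ps ih =>
    intro pre acc
    have hen : PySem.List.enumerate (p :: ps) (pre.length : Int)
        = ((pre.length : Int), p) :: PySem.List.enumerate ps ((pre.length : Int) + 1) :=
      PySem.List.enumerate_cons ..
    by_cases hi : p = "items"
    · subst hi
      have h2 := ih (pre ++ ["items"]) acc
      simp only [List.length_append, List.length_cons, List.length_nil, List.count_append,
        List.count_cons, List.count_nil, List.append_assoc, List.singleton_append,
        Nat.cast_add, Nat.cast_one, Nat.cast_zero] at h2
      rw [show pvLoopA ((pre.length : Int) - (pre.count "properties" : Int)) acc ("items" :: ps)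
            = pvLoopA ((pre.length : Int) - (pre.count "properties" : Int) + 1) acc ps from rfl,
          hen]
      simp only [List.filter_cons]
      norm_num at h2 ⊢
      rw [show (pre.length : Int) + 1 - (List.count "properties" pre : Int)
            = (pre.length : Int) - (List.count "properties" pre : Int) + 1 by ring] at h2
      exact h2
    · by_cases hp : p = "properties"
      · subst hp
        have h2 := ih (pre ++ ["properties"]) acc
        simp only [List.length_append, List.length_cons, List.length_nil, List.count_append,
          List.count_cons, List.count_nil, List.append_assoc, List.singleton_append,
          Nat.cast_add, Nat.cast_one, Nat.cast_zero] at h2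
        rw [show pvLoopA ((pre.length : Int) - (pre.count "properties" : Int)) acc ("properties" :: ps)
              = pvLoopA ((pre.length : Int) - (pre.count "properties" : Int)) acc ps from rfl,
            hen]
        simp only [List.filter_cons]
        norm_num at h2 ⊢
        convert h2 using 3
      · have hc : List.count "properties" [p] = 0 := by
          simp [List.count_nil, hp]
        have h2 := ih (pre ++ [p])
          (acc ++ [((pre.length : Int) - (pre.count "properties" : Int) + 1, p)])
        simp only [List.length_append, List.length_cons, List.length_nil, List.count_append, hc,
          List.append_assoc, List.singleton_append, Nat.cast_add, Nat.cast_one, Nat.cast_zero,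
          Nat.add_zero] at h2
        norm_num at h2
        rw [show pvLoopA ((pre.length : Int) - (pre.count "properties" : Int)) acc (p :: ps)
              = pvLoopA ((pre.length : Int) - (pre.count "properties" : Int) + 1)
                  (acc ++ [((pre.length : Int) - (pre.count "properties" : Int) + 1, p)]) ps from by
            simp [pvLoopA, hi, hp],
            hen]
        simp only [List.filter_cons]
        have hkeep : (p != "properties" && p != "items") = true := by simp [hi, hp]
        rw [if_pos hkeep, List.map_cons]
        have htoNat : ((pre.length : Int) + 1).toNat = pre.length + 1 := by omega
        have htake : (pre ++ p :: ps).take (pre.length + 1) = pre ++ [p] := by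
          rw [show pre.length + 1 = (pre ++ [p]).length by simp,
              show pre ++ p :: ps = (pre ++ [p]) ++ ps by simp]
          exact List.take_left ..
        have hhead : ((pre.length : Int) + 1
              - (((pre ++ p :: ps).take ((pre.length : Int) + 1).toNat).count "properties" : Int))
            = (pre.length : Int) - (pre.count "properties" : Int) + 1 := by
          rw [htoNat, htake]
          simp [List.count_append, hc]
          ring
        rw [show (pre.length : Int) + 1 - (List.count "properties" pre : Int)
              = (pre.length : Int) - (List.count "properties" pre : Int) + 1 by ring] at h2
        simp only [hhead]
        exact h2

-- The closed-form map over the whole list, with slices rewritten to takes (every enumerate index is ≥ 0).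
theorem pv_alt_eq_take (path : List String) :
    schema_path_index_and_keys_for_pgsql_alt path
      = ((PySem.List.enumerate path 0).filter
          (fun ip => ip.2 != "properties" && ip.2 != "items")).map
          (fun ip => (ip.1 + 1 - ((path.take (ip.1 + 1).toNat).count "properties" : Int), ip.2)) := by
  unfold schema_path_index_and_keys_for_pgsql_alt
  apply List.map_congr_left
  intro ip hip
  have hmem := List.mem_of_mem_filter hip
  rw [PySem.List.mem_enumerate_iff] at hmem
  obtain ⟨k, hk, rfl⟩ := hmem
  have h0 : (0 : Int) ≤ (0 : Int) + (k : Int) + 1 := by omega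
  rw [PySem.List.slice_to _ h0]

-- ===== VERDICT (by name: the statement is the Claim_ definition above) =====
theorem schema_path_index_and_keys_for_pgsql_spec : Claim_equal_schema_path_index_and_keys_for_pgsql := by
  intro path _
  show _ = _
  have h := pv_loop_closed path [] []
  simp only [List.length_nil, List.count_nil, Nat.cast_zero, Int.sub_zero, List.nil_append] at h
  rw [schema_path_index_and_keys_for_pgsql, h, pv_alt_eq_take]
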